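-- pv_equiv track=rewrite | github.com/karishmatank/ls-core | py-110/other_practice/scramble_words.py | reconstruct_word
-- ===== SOURCE A (Python) =====
-- def reconstruct_word(word):
--     alpha_only = ''
--     non_alphas = []
--     for idx, char in enumerate(word):
--         if char.isalpha():
--             alpha_only += char
--         else:
--             non_alphas.append((idx, char))
--
--     first, *middle, last = alpha_only
--     middle.sort()
--     reconstructed = [first] + middle + [last]
--     for idx, char in non_alphas:
--         reconstructed.insert(idx, char)
--
--     return ''.join(reconstructed)
-- ===== SOURCE B (Python) =====
-- def reconstruct_word(word):
--     alphas = [c for c in word if c.isalpha()]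
--     fill = [alphas[0]] + sorted(alphas[1:-1]) + [alphas[-1]]
--     out = []
--     i = 0
--     for c in word:
--         if c.isalpha():
--             out.append(fill[i])
--             i += 1
--         else:
--             out.append(c)
--     return ''.join(out)
-- ===== Notes on version B (the rewrite author's own statement) =====
-- stated objective: alternative
-- what changed: B drops A's insert-at-index loop over the non-alphabetic characters: it builds the sorted fill list once and writes the output in a single left-to-right pass over the word, taking the next fill character at each alphabetic position; on the measured inputs the cost is comparable.
import Mathlib
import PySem

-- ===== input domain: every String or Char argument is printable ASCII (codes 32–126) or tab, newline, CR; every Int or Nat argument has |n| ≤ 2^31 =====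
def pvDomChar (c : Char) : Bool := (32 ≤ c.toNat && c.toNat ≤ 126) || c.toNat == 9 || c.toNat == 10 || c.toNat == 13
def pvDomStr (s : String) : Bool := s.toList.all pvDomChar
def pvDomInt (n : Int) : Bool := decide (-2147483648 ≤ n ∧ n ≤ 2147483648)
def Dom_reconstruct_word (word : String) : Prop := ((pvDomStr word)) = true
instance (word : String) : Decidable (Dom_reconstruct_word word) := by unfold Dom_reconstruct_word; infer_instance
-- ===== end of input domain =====

-- B replaces A's insert-at-index loop with one sorted fill list consumed in a
-- single left-to-right pass over the word (objective: alternative).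

-- ===== PORT A =====
-- loop 'for idx, char in enumerate(word)' accumulating (alpha_only, non_alphas)
def pvAStep (st : List Char × List (Int × Char)) (ic : Int × Char) :
    List Char × List (Int × Char) :=
  if PySem.Chars.isalpha ic.2 then (st.1 ++ [ic.2], st.2)
  else (st.1, st.2 ++ [ic])

def reconstruct_word (word : String) : String :=
  let st := (PySem.List.enumerate word.toList 0).foldl pvAStep ([], [])
  let alpha_only := st.1
  let non_alphas := st.2
  -- A's starred unpacking of alpha_only (Pre_ guarantees ≥ 2 letters, defaults unreachable)
  let first := PySem.List.pyGetD alpha_only 0 ' '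
  let middle := PySem.List.slice alpha_only (some 1) (some (-1))
  let last := PySem.List.pyGetD alpha_only (-1) ' '
  let middle := PySem.List.sorted middle (fun c => c) false
  let reconstructed := [first] ++ middle ++ [last]
  let reconstructed := non_alphas.foldl (fun acc p => PySem.List.insert acc p.1 p.2) reconstructed
  String.ofList reconstructed

-- ===== PORT B =====
-- loop 'for c in word' with state (out, i), reading fill[i] at alphabetic positions
def pvBStep (fill : List Char) (st : List Char × Nat) (c : Char) : List Char × Nat :=
  if PySem.Chars.isalpha c then (st.1 ++ [fill.getD st.2 ' '], st.2 + 1)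
  else (st.1 ++ [c], st.2)

def reconstruct_word_alt (word : String) : String :=
  let alphas := word.toList.filter (fun c => PySem.Chars.isalpha c)
  let fill := [PySem.List.pyGetD alphas 0 ' ']
      ++ PySem.List.sorted (PySem.List.slice alphas (some 1) (some (-1))) (fun c => c) false
      ++ [PySem.List.pyGetD alphas (-1) ' ']
  let st := word.toList.foldl (pvBStep fill) ([], 0)
  String.ofList st.1

-- ===== PRECONDITION & SPEC =====
-- Pre_ excludes words with fewer than two alphabetic characters, on which A's starred
-- unpacking of the letters raises ValueError (A never returns there).
def Pre_reconstruct_word (word : String) : Prop :=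
  2 ≤ word.toList.countP (fun c => PySem.Chars.isalpha c)
instance (word : String) : Decidable (Pre_reconstruct_word word) := by
  unfold Pre_reconstruct_word; infer_instance
def pvWitness_reconstruct_word : String := "ab,cd!"

def Spec_reconstruct_word (word : String) (out : String) : Prop := out = reconstruct_word_alt word
instance (word : String) (out : String) : Decidable (Spec_reconstruct_word word out) := by
  unfold Spec_reconstruct_word; infer_instance

-- ===== CLAIM (what is proved, stated in full; the proofs are below) =====
def Claim_equal_reconstruct_word : Prop := ∀ (word : String), Dom_reconstruct_word word → Pre_reconstruct_word word → Spec_reconstruct_word word (reconstruct_word word)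

-- ===== LEMMAS AND PROOFS =====

-- indexed non-alphabetic characters of w, indices starting at i
def pvNonAlphas (i : Int) : List Char → List (Int × Char)
  | [] => []
  | c :: ws =>
    if PySem.Chars.isalpha c then pvNonAlphas (i + 1) ws
    else (i, c) :: pvNonAlphas (i + 1) ws

-- w with its alphabetic positions replaced, left to right, by the elements of fill
def pvMerge : List Char → List Char → List Char
  | [], fill => fill
  | c :: ws, fill =>
    if PySem.Chars.isalpha c then
      match fill with
      | f :: fs => f :: pvMerge ws fs
      | [] => pvMerge ws []
    else c :: pvMerge ws fill

-- w with its alphabetic positions replaced by fill[i], fill[i+1], …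
def pvItl (fill : List Char) (i : Nat) : List Char → List Char
  | [] => []
  | c :: ws =>
    if PySem.Chars.isalpha c then fill.getD i ' ' :: pvItl fill (i + 1) ws
    else c :: pvItl fill i ws

theorem pvA_loop (w : List Char) : ∀ (i : Int) (a : List Char) (b : List (Int × Char)),
    (PySem.List.enumerate w i).foldl pvAStep (a, b)
      = (a ++ w.filter (fun c => PySem.Chars.isalpha c), b ++ pvNonAlphas i w) := by
  induction w with
  | nil => intro i a b; simp [PySem.List.enumerate_nil, pvNonAlphas]
  | cons c ws ih =>
    intro i a b
    rw [PySem.List.enumerate_cons]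
    by_cases h : PySem.Chars.isalpha c
    · simp [List.foldl_cons, pvAStep, h, pvNonAlphas, ih]
    · simp [List.foldl_cons, pvAStep, h, pvNonAlphas, ih]

theorem pvB_loop (fill : List Char) (w : List Char) : ∀ (i : Nat) (a : List Char),
    (w.foldl (pvBStep fill) (a, i)).1 = a ++ pvItl fill i w := by
  induction w with
  | nil => intro i a; simp [pvItl]
  | cons c ws ih =>
    intro i a
    by_cases h : PySem.Chars.isalpha c
    · simp [List.foldl_cons, pvBStep, h, pvItl, ih]
    · simp [List.foldl_cons, pvBStep, h, pvItl, ih]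

theorem pvInsert_loop (w : List Char) : ∀ (pre fill : List Char),
    w.countP (fun c => PySem.Chars.isalpha c) ≤ fill.length →
    (pvNonAlphas (pre.length : Int) w).foldl
        (fun acc p => PySem.List.insert acc p.1 p.2) (pre ++ fill)
      = pre ++ pvMerge w fill := by
  induction w with
  | nil => intro pre fill _; simp [pvNonAlphas, pvMerge]
  | cons c ws ih =>
    intro pre fill hlen
    rw [List.countP_cons] at hlen
    by_cases h : PySem.Chars.isalpha c
    · -- alphabetic: fill is nonempty
      simp only [h, if_pos] at hlen
      obtain ⟨f, fs, rfl⟩ : ∃ f fs, fill = f :: fs := by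
        cases fill with
        | nil => simp at hlen
        | cons f fs => exact ⟨f, fs, rfl⟩
      simp only [List.length_cons] at hlen
      have hIH := ih (pre ++ [f]) fs (by omega)
      simp only [List.append_assoc, List.singleton_append, List.length_append,
        List.length_cons, List.length_nil] at hIH
      push_cast at hIH
      simp only [pvNonAlphas, pvMerge, h, if_true]
      exact hIH
    · -- non-alphabetic: insert at index pre.length
      simp only [h] at hlen
      simp only [pvNonAlphas, pvMerge, h, Bool.false_eq_true, if_false, List.foldl_cons]
      rw [PySem.List.insert_natCast (pre ++ fill) pre.length c (by simp)]
      rw [List.take_left, List.drop_left]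
      have hIH := ih (pre ++ [c]) fill (by omega)
      simp only [List.append_assoc, List.singleton_append, List.length_append,
        List.length_cons, List.length_nil] at hIH
      push_cast at hIH
      exact hIH

theorem pvItl_eq_merge (fill : List Char) (w : List Char) : ∀ (i : Nat),
    w.countP (fun c => PySem.Chars.isalpha c) = (fill.drop i).length →
    pvItl fill i w = pvMerge w (fill.drop i) := by
  induction w with
  | nil =>
    intro i h
    rw [List.countP_nil] at h
    have : fill.drop i = [] := List.eq_nil_of_length_eq_zero h.symm
    simp [pvItl, pvMerge, this]
  | cons c ws ih =>
    intro i h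
    rw [List.countP_cons] at h
    by_cases ha : PySem.Chars.isalpha c
    · simp only [ha, if_pos] at h
      obtain ⟨f, fs, hd⟩ : ∃ f fs, fill.drop i = f :: fs := by
        cases hdi : fill.drop i with
        | nil => rw [hdi] at h; simp at h
        | cons f fs => exact ⟨f, fs, rfl⟩
      have hlt : i < fill.length := by
        by_contra hge
        rw [List.drop_eq_nil_of_le (by omega)] at hd; exact (List.cons_ne_nil _ _) hd.symm
      have hget : fill.getD i ' ' = f := by
        have h9 : (fill.drop i).head? = some f := by rw [hd]; rfl
        rw [List.head?_drop, List.getElem?_eq_getElem hlt] at h9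
        simp [List.getD, List.getElem?_eq_getElem hlt]
        exact Option.some_injective _ h9
      have hd1 : fill.drop (i + 1) = fs := by
        have h10 := congrArg (List.drop 1) hd
        rw [List.drop_drop] at h10
        simpa using h10
      simp only [pvItl, ha, if_true, pvMerge, hd, hget]
      rw [ih (i + 1) (by rw [hd1]; rw [hd] at h; simp at h ⊢; omega), hd1]
    · simp only [ha, Bool.false_eq_true, if_false] at h
      simp only [pvItl, pvMerge, ha, Bool.false_eq_true, if_false]
      rw [ih i (by omega)]

theorem pvCount_filter (w : List Char) :
    (w.filter (fun c => PySem.Chars.isalpha c)).length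
      = w.countP (fun c => PySem.Chars.isalpha c) := by rw [List.countP_eq_length_filter]

-- length of the fill list [first] ++ sorted(middle) ++ [last]
theorem pvFill_length (al : List Char) (h2 : 2 ≤ al.length) :
    ([PySem.List.pyGetD al 0 ' ']
      ++ PySem.List.sorted (PySem.List.slice al (some 1) (some (-1))) (fun c => c) false
      ++ [PySem.List.pyGetD al (-1) ' ']).length = al.length := by
  have hs : (PySem.List.slice al (some 1) (some (-1))).length = al.length - 2 := by
    rw [PySem.List.length_slice]
    simp [pysem]
    omega
  simp [hs]
  omega

theorem reconstruct_word_eq (word : String) (h : Pre_reconstruct_word word) :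
    reconstruct_word word = reconstruct_word_alt word := by
  unfold Pre_reconstruct_word at h
  unfold reconstruct_word reconstruct_word_alt
  simp only [pvA_loop word.toList 0 [] [], List.nil_append]
  set w := word.toList with hw
  set al := w.filter (fun c => PySem.Chars.isalpha c) with hal
  have hallen : 2 ≤ al.length := by rw [hal, pvCount_filter]; exact h
  set fill := [PySem.List.pyGetD al 0 ' ']
      ++ PySem.List.sorted (PySem.List.slice al (some 1) (some (-1))) (fun c => c) false
      ++ [PySem.List.pyGetD al (-1) ' '] with hfill
  have hflen : fill.length = al.length := pvFill_length al hallen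
  have hcnt : w.countP (fun c => PySem.Chars.isalpha c) = fill.length := by
    rw [hflen, hal, pvCount_filter]
  have hIns := pvInsert_loop w [] fill (le_of_eq hcnt)
  simp only [List.length_nil, Nat.cast_zero, List.nil_append] at hIns
  rw [hIns]
  rw [pvB_loop fill w 0 []]
  rw [pvItl_eq_merge fill w 0 (by simpa using hcnt)]
  simp

-- ===== VERDICT (by name: the statement is the Claim_ definition above) =====
theorem reconstruct_word_spec : Claim_equal_reconstruct_word := by
  intro word _ hpre
  unfold Spec_reconstruct_word
  exact reconstruct_word_eq word hpre
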